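-- pv_equiv track=rewrite | github.com/kgutzkow/digitale-gesamtausgabe | tei_reader.py | title_letter
-- ===== SOURCE A (Python) =====
-- def title_letter(text):
--     """Slightly smarter title letter extraction that ignores common articles/prefixes."""
--     if text.lower().startswith('der ') or text.lower().startswith('die ') or text.lower().startswith('das ')\
--             or text.lower().startswith('zur ') or text.lower().startswith('vom ') or text.lower().startswith('ein '):
--         if text[4] != '"':
--             return text[4].upper()
--         else:
--             return text[5].upper()
--     elif text.lower().startswith('eine '):
--         return text[5].upper()
--     elif text.lower().startswith('['):
--         return title_letter(text[1:])
--     else: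
--         return text[0].upper()
-- ===== SOURCE B (Python) =====
-- def title_letter(text):
--     """Iterative variant: strip all leading brackets once, then do the article checks."""
--     while text.startswith('['):
--         text = text[1:]
--     low = text.lower()
--     if low.startswith(('der ', 'die ', 'das ', 'zur ', 'vom ', 'ein ')):
--         i = 5 if text[4] == '"' else 4
--         return text[i].upper()
--     if low.startswith('eine '):
--         return text[5].upper()
--     return text[0].upper()
-- ===== Notes on version B (the rewrite author's own statement) =====
-- stated objective: simpler
-- what changed: A's tail recursion that strips one leading bracket per call is replaced by an explicit strip-all-brackets loop followed by a single pass of the article-prefix checks (with a tuple startswith and a computed index instead of the branch duplication).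
import Mathlib
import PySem

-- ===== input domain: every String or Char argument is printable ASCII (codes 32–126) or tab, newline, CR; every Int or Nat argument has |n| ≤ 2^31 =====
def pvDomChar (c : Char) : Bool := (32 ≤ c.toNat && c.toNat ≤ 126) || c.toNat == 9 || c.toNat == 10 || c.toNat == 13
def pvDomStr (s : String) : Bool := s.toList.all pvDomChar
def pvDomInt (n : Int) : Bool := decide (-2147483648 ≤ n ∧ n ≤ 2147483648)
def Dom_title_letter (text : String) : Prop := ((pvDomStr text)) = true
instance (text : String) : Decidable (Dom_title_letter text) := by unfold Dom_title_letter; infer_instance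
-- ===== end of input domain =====

-- B replaces A's tail recursion through leading brackets by an explicit strip-brackets loop followed
-- by a single pass of the article checks (objective: simpler/iterative decomposition; same cost).
-- On inputs excluded by Pre_ the Python A raises IndexError; both ports return "" there.

-- ===== PORT A =====
-- literal transliteration of A; the `match … | none => ""` arms are exactly where Python raises
-- IndexError (excluded by Pre_title_letter).
def titleLetterA : List Char → String :=
  fun cs =>
    if PySem.Chars.startswith (PySem.Chars.lower cs) "der ".toList || PySem.Chars.startswith (PySem.Chars.lower cs) "die ".toList
        || PySem.Chars.startswith (PySem.Chars.lower cs) "das ".toList || PySem.Chars.startswith (PySem.Chars.lower cs) "zur ".toList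
        || PySem.Chars.startswith (PySem.Chars.lower cs) "vom ".toList || PySem.Chars.startswith (PySem.Chars.lower cs) "ein ".toList then
      match PySem.List.pyGet? cs 4 with
      | some c =>
        if c ≠ '"' then String.ofList (PySem.Chars.upper [c])
        else
          match PySem.List.pyGet? cs 5 with
          | some d => String.ofList (PySem.Chars.upper [d])
          | none => ""
      | none => ""
    else if PySem.Chars.startswith (PySem.Chars.lower cs) "eine ".toList then
      match PySem.List.pyGet? cs 5 with
      | some d => String.ofList (PySem.Chars.upper [d])
      | none => ""
    else if h : PySem.Chars.startswith (PySem.Chars.lower cs) "[".toList then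
      titleLetterA (PySem.List.slice cs (some 1) none)
    else
      match PySem.List.pyGet? cs 0 with
      | some c => String.ofList (PySem.Chars.upper [c])
      | none => ""
termination_by cs => cs.length
decreasing_by
  rename_i cs0 _ _
  rw [PySem.List.slice_from_one]
  cases cs0 with
  | nil => simp [PySem.Chars.lower, PySem.Chars.startswith] at h
  | cons c r => simp

def title_letter (text : String) : String := titleLetterA text.toList

-- ===== PORT B =====
-- `while text.startswith('['): text = text[1:]`
def stripBrackets : List Char → List Char
  | [] => []
  | c :: rest => if c == '[' then stripBrackets rest else c :: rest

def titleLetterB (cs0 : List Char) : String :=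
  let cs := stripBrackets cs0
  let low := PySem.Chars.lower cs
  if ["der ".toList, "die ".toList, "das ".toList, "zur ".toList, "vom ".toList, "ein ".toList].any
      (fun p => PySem.Chars.startswith low p) then
    match PySem.List.pyGet? cs 4 with
    | some c =>
      let i : Int := if c = '"' then 5 else 4
      match PySem.List.pyGet? cs i with
      | some d => String.ofList (PySem.Chars.upper [d])
      | none => ""
    | none => ""
  else if PySem.Chars.startswith low "eine ".toList then
    match PySem.List.pyGet? cs 5 with
    | some d => String.ofList (PySem.Chars.upper [d])
    | none => ""
  else
    match PySem.List.pyGet? cs 0 with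
    | some c => String.ofList (PySem.Chars.upper [c])
    | none => ""

def title_letter_alt (text : String) : String := titleLetterB text.toList

-- ===== PRECONDITION & SPEC =====
-- Pre_ excludes exactly the inputs on which the Python A raises IndexError: those that are all
-- brackets/empty, or whose bracket-stripped rest matches an article prefix but is too short for
-- the indexed character after the article.
def Pre_title_letter (text : String) : Prop :=
  let s := text.toList.dropWhile (fun c => c == '[')
  let low := PySem.Chars.lower s
  s ≠ [] ∧
  ((PySem.Chars.startswith low "der ".toList || PySem.Chars.startswith low "die ".toList
      || PySem.Chars.startswith low "das ".toList || PySem.Chars.startswith low "zur ".toList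
      || PySem.Chars.startswith low "vom ".toList || PySem.Chars.startswith low "ein ".toList) = true →
    5 ≤ s.length ∧ (s.getD 4 ' ' = '"' → 6 ≤ s.length)) ∧
  (PySem.Chars.startswith low "eine ".toList = true → 6 ≤ s.length)
instance (text : String) : Decidable (Pre_title_letter text) := by unfold Pre_title_letter; infer_instance

def pvWitness_title_letter : String := "[Der Hase"

def Spec_title_letter (text : String) (out : String) : Prop := out = title_letter_alt text
instance (text : String) (out : String) : Decidable (Spec_title_letter text out) := by unfold Spec_title_letter; infer_instance

-- ===== CLAIM (what is proved, stated in full; the proofs are below) =====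
def Claim_equal_title_letter : Prop := ∀ (text : String), Dom_title_letter text → Pre_title_letter text → Spec_title_letter text (title_letter text)

-- ===== LEMMAS AND PROOFS =====

theorem lowerChar_eq_lbrack {c : Char} (h : PySem.Chars.lowerChar c = '[') : c = '[' := by
  unfold PySem.Chars.lowerChar at h
  split at h
  · rename_i hu
    simp only [PySem.Chars.isupper, Bool.and_eq_true, decide_eq_true_eq] at hu
    have h1 : 65 ≤ c.toNat := Char.le_def.mp hu.1
    have h2 : c.toNat ≤ 90 := Char.le_def.mp hu.2
    have := congrArg Char.toNat h
    rw [Char.toNat_ofNat, if_pos (Or.inl (by omega : c.toNat + 32 < 55296))] at this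
    have h3 : ('['.toNat) = 91 := rfl
    omega
  · exact h

-- A's recursion strips one leading '['.
theorem titleLetterA_bracket (rest : List Char) :
    titleLetterA ('[' :: rest) = titleLetterA rest := by
  have hlow : PySem.Chars.lower ('[' :: rest) = '[' :: PySem.Chars.lower rest := by
    simp [PySem.Chars.lower, PySem.Chars.lowerChar, PySem.Chars.isupper]
  rw [titleLetterA, PySem.List.slice_from_one, hlow]
  simp [PySem.Chars.startswith, List.isPrefixOf]

-- iterating: A on cs equals A on the fully stripped cs
theorem titleLetterA_strip (cs : List Char) :
    titleLetterA cs = titleLetterA (stripBrackets cs) := by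
  induction cs with
  | nil => rfl
  | cons c rest ih =>
      by_cases hc : c = '['
      · subst hc
        rw [titleLetterA_bracket, ih]; simp [stripBrackets]
      · simp [stripBrackets, hc]

theorem stripBrackets_head (cs : List Char) :
    (stripBrackets cs).head? ≠ some '[' := by
  induction cs with
  | nil => simp [stripBrackets]
  | cons c rest ih =>
      by_cases hc : c = '['
      · simpa [stripBrackets, hc] using ih
      · simp [stripBrackets, hc]

-- on a list not starting with '[', A's one unfolding equals B's core
theorem titleLetterA_core (s : List Char) (hs : s.head? ≠ some '[') :
    titleLetterA s = titleLetterB s := by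
  have hstrip : stripBrackets s = s := by
    cases s with
    | nil => rfl
    | cons c r =>
        have hc : c ≠ '[' := by intro h; exact hs (by simp [h])
        simp [stripBrackets, hc]
  have hbr : PySem.Chars.startswith (PySem.Chars.lower s) ['['] = false := by
    cases s with
    | nil => rfl
    | cons c r =>
        have hc : c ≠ '[' := by intro h; exact hs (by simp [h])
        simp only [PySem.Chars.startswith, PySem.Chars.lower, List.map_cons]
        simp [List.isPrefixOf, beq_eq_false_iff_ne]
        intro h
        exact hc (lowerChar_eq_lbrack h.symm)
  rw [titleLetterA]
  simp only [titleLetterB, hstrip]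
  have hany : (["der ".toList, "die ".toList, "das ".toList, "zur ".toList, "vom ".toList,
      "ein ".toList].any (fun p => PySem.Chars.startswith (PySem.Chars.lower s) p))
      = (PySem.Chars.startswith (PySem.Chars.lower s) "der ".toList
        || PySem.Chars.startswith (PySem.Chars.lower s) "die ".toList
        || PySem.Chars.startswith (PySem.Chars.lower s) "das ".toList
        || PySem.Chars.startswith (PySem.Chars.lower s) "zur ".toList
        || PySem.Chars.startswith (PySem.Chars.lower s) "vom ".toList
        || PySem.Chars.startswith (PySem.Chars.lower s) "ein ".toList) := by
    simp only [List.any_cons, List.any_nil, Bool.or_false, Bool.or_assoc]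
  rw [hany]
  refine if_congr Iff.rfl ?_ (if_congr Iff.rfl rfl ?_)
  · cases hg : PySem.List.pyGet? s 4 with
    | none => rfl
    | some c =>
        by_cases hq : c = '"'
        · simp [hq]
        · simp [hq, hg]
  · rw [dif_neg (by simp [hbr])]

-- ===== VERDICT (by name: the statement is the Claim_ definition above) =====
theorem title_letter_spec : Claim_equal_title_letter := by
  intro text _ _
  unfold Spec_title_letter title_letter title_letter_alt
  rw [titleLetterA_strip]
  rw [titleLetterA_core _ (stripBrackets_head _)]
  unfold titleLetterB
  rw [show stripBrackets (stripBrackets text.toList) = stripBrackets text.toList from by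
    have h := stripBrackets_head text.toList
    cases hh : stripBrackets text.toList with
    | nil => rfl
    | cons c r =>
        rw [hh] at h; simp at h
        simp [stripBrackets, h]]
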